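-- pv_equiv track=rewrite | github.com/flunka/PRIR | kmp/client/kmp.py | build_patterns
-- ===== SOURCE A (Python) =====
-- def build_patterns(expression):
--   patterns = [""]
--   index = 0
--   while (index < len(expression)):
--     if (expression[index] == "["):
--       index += 1
--       old_patterns = patterns[:]
--       first = True
--       while (expression[index] != "]"):
--         if (index + 1 >= len(expression) or expression[index].isalpha() == False):
--           raise ValueError('Invalid regex!!!')
--         if (first):
--           first = False
--           for i in range(0, len(patterns)):
--             patterns[i] += expression[index]
--         else:
--           for i in range(0, len(old_patterns)):
--             patterns.append(old_patterns[i] + expression[index])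
--         index += 1
--       index += 1
--     elif (expression[index] == "\\"):
--       index += 1
--       if (expression[index] == "d"):
--         index += 1
--         old_patterns = patterns[:]
--         for x in range(0, 10):
--           if (x == 0):
--             for i in range(0, len(patterns)):
--               patterns[i] += str(x)
--           else:
--             for i in range(0, len(old_patterns)):
--               patterns.append(old_patterns[i] + str(x))
--     else:
--       for i in range(0, len(patterns)):
--         patterns[i] += expression[index]
--       index += 1
--   for pattern in patterns:
--     yield pattern
-- ===== SOURCE B (Python) =====
-- def build_patterns(expression):
--     """Expand a tiny pattern language -- '[abc]' letter classes, '\\d' for any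
--     digit, everything else literal -- into every concrete string it matches.
--
--     Parses the expression once into a list of slots (candidate characters per
--     position), then folds the slots into the full cartesian product.
--     """
--     slots = []
--     i = 0
--     n = len(expression)
--     while i < n:
--         c = expression[i]
--         if c == '[':
--             i += 1
--             chars = []
--             while i < n and expression[i] != ']':
--                 if not expression[i].isalpha():
--                     raise ValueError('Invalid regex!!!')
--                 chars.append(expression[i])
--                 i += 1
--             if i == n:
--                 raise ValueError('Invalid regex!!!')
--             i += 1
--             if chars:
--                 slots.append(chars)
--         elif c == '\\' and i + 1 < n and expression[i + 1] == 'd':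
--             slots.append([str(d) for d in range(10)])
--             i += 2
--         elif c == '\\':
--             i += 1  # stray backslash: ignore it
--         else:
--             slots.append([c])
--             i += 1
--     results = ['']
--     for slot in slots:
--         results = [p + s for s in slot for p in results]
--     yield from results
-- ===== Notes on version B (the rewrite author's own statement) =====
-- stated objective: alternative
-- what changed: B replaces A's single-pass in-place pattern mutation (old_patterns copies, first-flag, append loops) with a two-phase design: parse the expression once into a list of candidate-character slots, then fold the slots into the full cartesian product; Pre_ excludes exactly the inputs on which A raises (ValueError on a malformed character class, IndexError on a trailing backslash or bracket).
import Mathlib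
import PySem

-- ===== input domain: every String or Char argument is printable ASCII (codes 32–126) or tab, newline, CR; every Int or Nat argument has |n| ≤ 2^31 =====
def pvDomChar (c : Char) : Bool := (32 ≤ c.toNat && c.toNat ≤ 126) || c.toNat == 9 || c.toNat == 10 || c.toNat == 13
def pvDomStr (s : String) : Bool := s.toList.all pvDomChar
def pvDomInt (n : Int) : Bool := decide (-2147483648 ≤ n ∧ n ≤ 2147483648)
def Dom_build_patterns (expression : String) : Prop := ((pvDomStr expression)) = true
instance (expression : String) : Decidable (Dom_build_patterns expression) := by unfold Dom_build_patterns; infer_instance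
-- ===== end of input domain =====

-- B re-implements A as a two-phase parse-into-slots + fold-of-products (same cost, clearer
-- decomposition); return values proved equal on Pre_ (the inputs where A raises no exception).

-- ===== PORT A =====
-- A's inner `\d` loop: for x in range(0,10): first digit in place, others appended
def aDigits (old : List String) : List String :=
  (PySem.List.pyRange 0 10 1).foldl
    (fun pats x =>
      if x = 0 then pats.map (fun p => p ++ PySem.Int.toStr x)
      else pats ++ old.map (fun p => p ++ PySem.Int.toStr x)) old

-- A's inner class loop `while expression[index] != "]"` (none = the raise / IndexError)
def aClass (old patterns : List String) (first : Bool) : List Char → Option (List String × List Char)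
  | [] => none
  | c :: rest =>
    if c = ']' then some (patterns, rest)
    else if rest = [] ∨ PySem.Chars.isalpha c = false then none
    else if first then aClass old (patterns.map (fun p => p ++ c.toString)) false rest
    else aClass old (patterns ++ old.map (fun p => p ++ c.toString)) false rest

theorem aClass_some_length (old patterns : List String) (first : Bool) (cs : List Char)
    (p : List String) (r : List Char) (h : aClass old patterns first cs = some (p, r)) :
    r.length < cs.length := by
  induction cs generalizing patterns first with
  | nil => simp [aClass] at h
  | cons c rest ih =>
    simp only [aClass] at h
    split_ifs at h with h1 h2 h3
    · cases h; simp
    · exact Nat.lt_trans (ih _ _ h) (by simp)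
    · exact Nat.lt_trans (ih _ _ h) (by simp)

-- A's outer `while index < len(expression)` loop (none = the raise / IndexError)
def aLoop (patterns : List String) : List Char → Option (List String)
  | [] => some patterns
  | c :: rest =>
    if c = '[' then
      match h : aClass patterns patterns true rest with
      | none => none
      | some (p, rest') => aLoop p rest'
    else if c = '\\' then
      match rest with
      | [] => none
      | c2 :: rest' =>
        if c2 = 'd' then aLoop (aDigits patterns) rest'
        else aLoop patterns (c2 :: rest')
    else aLoop (patterns.map (fun p => p ++ c.toString)) rest
termination_by cs => cs.length
decreasing_by
  · exact Nat.lt_trans (aClass_some_length _ _ _ _ _ _ h) (by simp)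
  · simp
  · simp
  · simp

def build_patterns (expression : String) : List String :=
  (aLoop [""] expression.toList).getD []

-- ===== PORT B =====
def digitSlot : List String := (PySem.List.pyRange 0 10 1).map PySem.Int.toStr

-- B's inner class-scanning while loop, state = collected chars (none = the ValueError)
def bClass (acc : List String) : List Char → Option (List String × List Char)
  | [] => none
  | c :: rest =>
    if c = ']' then some (acc, rest)
    else if PySem.Chars.isalpha c = false then none
    else bClass (acc ++ [c.toString]) rest

theorem bClass_some_length (acc : List String) (cs : List Char)
    (p : List String) (r : List Char) (h : bClass acc cs = some (p, r)) :
    r.length < cs.length := by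
  induction cs generalizing acc with
  | nil => simp [bClass] at h
  | cons c rest ih =>
    simp only [bClass] at h
    split_ifs at h with h1 h2
    · cases h; simp
    · exact Nat.lt_trans (ih _ h) (by simp)

-- B's outer while loop, state = list of slots built so far (empty classes add no slot;
-- a stray backslash is skipped)
def bSlotsAcc (slots : List (List String)) : List Char → Option (List (List String))
  | [] => some slots
  | c :: rest =>
    if c = '[' then
      match h : bClass [] rest with
      | none => none
      | some (cs, rest') => bSlotsAcc (slots ++ (if cs = [] then [] else [cs])) rest'
    else if c = '\\' then
      match rest with
      | [] => some slots
      | c2 :: rest' =>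
        if c2 = 'd' then bSlotsAcc (slots ++ [digitSlot]) rest'
        else bSlotsAcc slots (c2 :: rest')
    else bSlotsAcc (slots ++ [[c.toString]]) rest
termination_by cs => cs.length
decreasing_by
  · exact Nat.lt_trans (bClass_some_length _ _ _ _ h) (by simp)
  · simp
  · simp
  · simp

def build_patterns_alt (expression : String) : List String :=
  match bSlotsAcc [] expression.toList with
  | none => []
  | some slots =>
    slots.foldl (fun results slot => slot.flatMap (fun s => results.map (· ++ s))) [""]

-- ===== PRECONDITION & SPEC =====
-- Pre_ excludes exactly the inputs on which the Python A raises (ValueError on a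
-- non-alphabetic or unterminated character class, IndexError on a trailing '\' or '[').
-- It is a closed-form shape condition: a 4-state character DFA over the input
-- (0 = normal, 1 = inside '[..]', 2 = just after '\', 3 = rejected) must end in state 0.
def preStep (st : Nat) (c : Char) : Nat :=
  if st = 0 then (if c = '[' then 1 else if c = '\\' then 2 else 0)
  else if st = 1 then (if c = ']' then 0 else if PySem.Chars.isalpha c then 1 else 3)
  else if st = 2 then (if c = 'd' then 0 else if c = '[' then 1 else if c = '\\' then 2 else 0)
  else 3

def Pre_build_patterns (expression : String) : Prop := expression.toList.foldl preStep 0 = 0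
instance (expression : String) : Decidable (Pre_build_patterns expression) := by
  unfold Pre_build_patterns; infer_instance

def pvWitness_build_patterns : String := "a\\d[bc]"

def Spec_build_patterns (expression : String) (out : List String) : Prop := out = build_patterns_alt expression
instance (expression : String) (out : List String) : Decidable (Spec_build_patterns expression out) := by unfold Spec_build_patterns; infer_instance

-- ===== CLAIM (what is proved, stated in full; the proofs are below) =====
def Claim_equal_build_patterns : Prop := ∀ (expression : String), Dom_build_patterns expression → Pre_build_patterns expression → Spec_build_patterns expression (build_patterns expression)


-- ===== LEMMAS AND PROOFS =====

theorem aClass_stop (old p : List String) (f : Bool) (rest : List Char) :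
    aClass old p f (']' :: rest) = some (p, rest) := by simp [aClass]

theorem aClass_none (old p : List String) (f : Bool) (c : Char) (rest : List Char)
    (h1 : c ≠ ']') (h2 : rest = [] ∨ PySem.Chars.isalpha c = false) :
    aClass old p f (c :: rest) = none := by
  simp only [aClass]; rw [if_neg h1, if_pos h2]

theorem aClass_step_true (old p : List String) (c : Char) (rest : List Char)
    (h1 : c ≠ ']') (hr : rest ≠ []) (ha : PySem.Chars.isalpha c = true) :
    aClass old p true (c :: rest)
      = aClass old (p.map (fun x => x ++ c.toString)) false rest := by
  simp [aClass, h1, hr, ha]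

theorem aClass_step_false (old p : List String) (c : Char) (rest : List Char)
    (h1 : c ≠ ']') (hr : rest ≠ []) (ha : PySem.Chars.isalpha c = true) :
    aClass old p false (c :: rest)
      = aClass old (p ++ old.map (fun x => x ++ c.toString)) false rest := by
  simp [aClass, h1, hr, ha]

theorem bClass_stop (acc : List String) (rest : List Char) :
    bClass acc (']' :: rest) = some (acc, rest) := by simp [bClass]

theorem bClass_none (acc : List String) (c : Char) (rest : List Char)
    (h1 : c ≠ ']') (ha : PySem.Chars.isalpha c = false) :
    bClass acc (c :: rest) = none := by
  simp only [bClass]; rw [if_neg h1, if_pos ha]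

theorem bClass_step (acc : List String) (c : Char) (rest : List Char)
    (h1 : c ≠ ']') (ha : PySem.Chars.isalpha c = true) :
    bClass acc (c :: rest) = bClass (acc ++ [c.toString]) rest := by
  simp [bClass, h1, ha]

theorem bClass_acc (cs : List Char) (acc : List String) :
    bClass acc cs = (bClass [] cs).map (fun pr => (acc ++ pr.1, pr.2)) := by
  induction cs generalizing acc with
  | nil => simp [bClass]
  | cons c rest ih =>
    by_cases h1 : c = ']'
    · subst h1; rw [bClass_stop, bClass_stop]; simp
    · by_cases ha : PySem.Chars.isalpha c = true
      · rw [bClass_step acc c rest h1 ha, bClass_step [] c rest h1 ha,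
            ih (acc ++ [c.toString]), ih ([] ++ [c.toString])]
        cases bClass [] rest <;> simp
      · rw [bClass_none acc c rest h1 (by simpa using ha),
            bClass_none [] c rest h1 (by simpa using ha)]
        rfl

theorem classInv (cs : List Char) (old acc : List String) :
    aClass old (acc.flatMap (fun s => old.map (· ++ s))) false cs
    = (bClass acc cs).map (fun pr => (pr.1.flatMap (fun s => old.map (· ++ s)), pr.2)) := by
  induction cs generalizing acc with
  | nil => simp [aClass, bClass]
  | cons c rest ih =>
    by_cases h1 : c = ']'
    · subst h1; rw [aClass_stop, bClass_stop]; rfl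
    · by_cases ha : PySem.Chars.isalpha c = true
      · by_cases hr : rest = []
        · subst hr
          rw [aClass_none _ _ _ _ _ h1 (Or.inl rfl), bClass_step _ _ _ h1 ha]
          rfl
        · rw [aClass_step_false _ _ _ _ h1 hr ha, bClass_step _ _ _ h1 ha,
              show acc.flatMap (fun s => old.map (· ++ s)) ++ old.map (fun x => x ++ c.toString)
                = (acc ++ [c.toString]).flatMap (fun s => old.map (· ++ s)) from by simp]
          exact ih (acc ++ [c.toString])
      · rw [aClass_none _ _ _ _ _ h1 (Or.inr (by simpa using ha)),
            bClass_none _ _ _ h1 (by simpa using ha)]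
        rfl

theorem classTop (cs : List Char) (old : List String) :
    aClass old old true cs
    = (bClass [] cs).map (fun pr =>
        (if pr.1 = [] then old else pr.1.flatMap (fun s => old.map (· ++ s)), pr.2)) := by
  cases cs with
  | nil => simp [aClass, bClass]
  | cons c rest =>
    by_cases h1 : c = ']'
    · subst h1; rw [aClass_stop, bClass_stop]; rfl
    · by_cases ha : PySem.Chars.isalpha c = true
      · by_cases hr : rest = []
        · subst hr
          rw [aClass_none _ _ _ _ _ h1 (Or.inl rfl), bClass_step _ _ _ h1 ha]
          rfl
        · rw [aClass_step_true _ _ _ _ h1 hr ha, bClass_step _ _ _ h1 ha,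
              show old.map (fun x => x ++ c.toString)
                = [c.toString].flatMap (fun s => old.map (· ++ s)) from by simp]
          rw [classInv rest old [c.toString], List.nil_append,
              bClass_acc rest [c.toString]]
          cases bClass [] rest <;> simp
      · rw [aClass_none _ _ _ _ _ h1 (Or.inr (by simpa using ha)),
            bClass_none _ _ _ h1 (by simpa using ha)]
        rfl

theorem aDigits_eq (patterns : List String) :
    aDigits patterns = digitSlot.flatMap (fun s => patterns.map (· ++ s)) := by
  rw [aDigits, digitSlot,
    show PySem.List.pyRange 0 10 1 = [0,1,2,3,4,5,6,7,8,9] from by decide]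
  simp [List.foldl, List.flatMap]

theorem aLoop_cons (patterns : List String) (c : Char) (rest : List Char) :
    aLoop patterns (c :: rest) =
      (if c = '[' then
        match _h : aClass patterns patterns true rest with
        | none => none
        | some (p, rest') => aLoop p rest'
      else if c = '\\' then
        match rest with
        | [] => none
        | c2 :: rest' =>
          if c2 = 'd' then aLoop (aDigits patterns) rest'
          else aLoop patterns (c2 :: rest')
      else aLoop (patterns.map (fun p => p ++ c.toString)) rest) := by
  rw [aLoop.eq_def]

theorem bSlotsAcc_cons (slots : List (List String)) (c : Char) (rest : List Char) :
    bSlotsAcc slots (c :: rest) =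
      (if c = '[' then
        match _h : bClass [] rest with
        | none => none
        | some (cs, rest') => bSlotsAcc (slots ++ (if cs = [] then [] else [cs])) rest'
      else if c = '\\' then
        match rest with
        | [] => some slots
        | c2 :: rest' =>
          if c2 = 'd' then bSlotsAcc (slots ++ [digitSlot]) rest'
          else bSlotsAcc slots (c2 :: rest')
      else bSlotsAcc (slots ++ [[c.toString]]) rest) := by
  rw [bSlotsAcc.eq_def]

theorem bSlotsAcc_accN (n : ℕ) (cs : List Char) (slots : List (List String)) (hn : cs.length ≤ n) :
    bSlotsAcc slots cs = (bSlotsAcc [] cs).map (slots ++ ·) := by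
  induction n generalizing cs slots with
  | zero =>
    match cs with
    | [] => simp [bSlotsAcc]
    | _ :: _ => simp at hn
  | succ n ih =>
    match cs with
    | [] => simp [bSlotsAcc]
    | c :: rest =>
      have hr : rest.length ≤ n := by simpa using hn
      rw [bSlotsAcc_cons slots c rest, bSlotsAcc_cons [] c rest]
      split_ifs with h1 h2
      · cases hb : bClass [] rest with
        | none => rfl
        | some pr =>
          obtain ⟨cs', rest'⟩ := pr
          have hlt : rest'.length < rest.length := bClass_some_length _ _ _ _ hb
          dsimp only
          rw [ih rest' _ (by omega), ih rest' ([] ++ (if cs' = [] then [] else [cs'])) (by omega)]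
          cases bSlotsAcc [] rest' <;> simp
      · match rest with
        | [] => simp
        | c2 :: rest' =>
          dsimp only
          split_ifs with h3
          · rw [ih rest' _ (by simp at hr; omega), ih rest' ([] ++ [digitSlot]) (by simp at hr; omega)]
            cases bSlotsAcc [] rest' <;> simp
          · exact ih (c2 :: rest') slots hr
      · rw [ih rest _ hr, ih rest ([] ++ [[c.toString]]) hr]
        cases bSlotsAcc [] rest <;> simp

theorem bSlotsAcc_acc (cs : List Char) (slots : List (List String)) :
    bSlotsAcc slots cs = (bSlotsAcc [] cs).map (slots ++ ·) :=
  bSlotsAcc_accN cs.length cs slots le_rfl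

-- Pre_ (DFA ends in state 0) implies A's class loop succeeds, leaving a suffix again in state 0
theorem aClass_pre (cs : List Char) (old patterns : List String) (first : Bool)
    (h : cs.foldl preStep 1 = 0) :
    ∃ p r, aClass old patterns first cs = some (p, r) ∧ r.foldl preStep 0 = 0 := by
  induction cs generalizing patterns first with
  | nil => simp [preStep] at h
  | cons c rest ih =>
    by_cases hc : c = ']'
    · subst hc
      refine ⟨patterns, rest, by simp [aClass], ?_⟩
      simpa [preStep] using h
    · have halpha : PySem.Chars.isalpha c = true := by
        by_contra hfa
        rw [List.foldl_cons, show preStep 1 c = 3 from by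
          simp [preStep, hc, Bool.eq_false_iff.mpr hfa]] at h
        have : ∀ l : List Char, l.foldl preStep 3 = 3 := by
          intro l; induction l with
          | nil => rfl
          | cons x xs ihx => simpa [preStep] using ihx
        rw [this] at h; omega
      have hst : rest.foldl preStep 1 = 0 := by
        rw [List.foldl_cons, show preStep 1 c = 1 from by simp [preStep, hc, halpha]] at h
        exact h
      have hrne : rest ≠ [] := by
        intro hr; rw [hr] at hst; simp at hst
      obtain ⟨p, r, heq, hr0⟩ := ih (if first then patterns.map (fun p => p ++ c.toString)
        else patterns ++ old.map (fun p => p ++ c.toString)) false hst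
      refine ⟨p, r, ?_, hr0⟩
      simp only [aClass]
      rw [if_neg hc, if_neg (by simp [hrne, halpha])]
      cases first
      · rw [if_neg (by simp)]; simpa using heq
      · rw [if_pos rfl]; simpa using heq

-- Pre_ implies A returns (aLoop is some)
theorem aLoop_pre (n : ℕ) (cs : List Char) (patterns : List String) (hn : cs.length ≤ n)
    (h : cs.foldl preStep 0 = 0) : (aLoop patterns cs).isSome = true := by
  induction n generalizing cs patterns with
  | zero =>
    match cs with
    | [] => simp [aLoop]
    | _ :: _ => simp at hn
  | succ n ih =>
    match cs with
    | [] => simp [aLoop]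
    | c :: rest =>
      have hr : rest.length ≤ n := by simpa using hn
      rw [aLoop_cons]
      split_ifs with h1 h2
      · subst h1
        have hst : rest.foldl preStep 1 = 0 := by simpa [preStep] using h
        obtain ⟨p, r, heq, hr0⟩ := aClass_pre rest patterns patterns true hst
        rw [heq]
        have : r.length < rest.length := aClass_some_length _ _ _ _ _ _ heq
        exact ih r p (by omega) hr0
      · subst h2
        match rest with
        | [] => simp [preStep] at h
        | c2 :: rest' =>
          dsimp only
          have h2' : (c2 :: rest').foldl preStep 2 = 0 := by simpa [preStep] using h
          by_cases hd : c2 = 'd'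
          · rw [if_pos hd]
            subst hd
            exact ih rest' _ (by simp at hr; omega)
              (by simpa [preStep] using h2')
          · rw [if_neg hd]
            refine ih (c2 :: rest') patterns hr ?_
            rw [List.foldl_cons] at h2' ⊢
            rw [show preStep 0 c2 = preStep 2 c2 from by simp [preStep, hd]]
            exact h2'
      · refine ih rest _ hr ?_
        simpa [preStep, h1, h2] using h

-- Whenever A returns, its result is B's slots folded into a product
theorem mainLemma (n : ℕ) (cs : List Char) (patterns : List String) (hn : cs.length ≤ n)
    (hs : (aLoop patterns cs).isSome = true) :
    aLoop patterns cs
    = (bSlotsAcc [] cs).map (fun slots =>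
        slots.foldl (fun results slot => slot.flatMap (fun s => results.map (· ++ s))) patterns) := by
  induction n generalizing cs patterns with
  | zero =>
    match cs with
    | [] => simp [aLoop, bSlotsAcc]
    | _ :: _ => simp at hn
  | succ n ih =>
    match cs with
    | [] => simp [aLoop, bSlotsAcc]
    | c :: rest =>
      have hr : rest.length ≤ n := by simpa using hn
      rw [aLoop_cons] at hs ⊢
      rw [bSlotsAcc_cons]
      split_ifs at hs ⊢ with h1 h2
      · rw [classTop] at hs ⊢
        cases hb : bClass [] rest with
        | none => rw [hb] at hs; simp at hs
        | some pr =>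
          obtain ⟨cs', rest'⟩ := pr
          rw [hb] at hs
          have hlt : rest'.length < rest.length := bClass_some_length _ _ _ _ hb
          simp only [Option.map_some] at hs ⊢
          rw [ih rest' _ (by omega) hs,
              bSlotsAcc_acc rest' ([] ++ (if cs' = [] then [] else [cs']))]
          cases bSlotsAcc [] rest' with
          | none => rfl
          | some tail =>
            by_cases hcs : cs' = [] <;> simp [hcs]
      · match rest with
        | [] => simp at hs
        | c2 :: rest' =>
          dsimp only at hs ⊢
          split_ifs at hs ⊢ with h3
          · rw [ih rest' _ (by simp at hr; omega) hs,
                bSlotsAcc_acc rest' ([] ++ [digitSlot]), aDigits_eq]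
            cases bSlotsAcc [] rest' <;> simp
          · exact ih (c2 :: rest') patterns hr hs
      · rw [ih rest _ hr hs, bSlotsAcc_acc rest ([] ++ [[c.toString]])]
        cases bSlotsAcc [] rest <;> simp

-- ===== VERDICT (by name: the statement is the Claim_ definition above) =====
theorem build_patterns_spec : Claim_equal_build_patterns := by
  intro expression _ hpre
  unfold Pre_build_patterns at hpre
  have hs := aLoop_pre expression.toList.length expression.toList [""] le_rfl hpre
  have hm := mainLemma expression.toList.length expression.toList [""] le_rfl hs
  unfold Spec_build_patterns build_patterns build_patterns_alt
  cases hb : bSlotsAcc [] expression.toList with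
  | none => rw [hb] at hm; rw [hm] at hs; simp at hs
  | some slots => rw [hm, hb]; simp
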